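-- pv_equiv track=rewrite | github.com/Ewa-Anna/Advent-of-Code | 2024/Day_10/day_10_part_2.py | calculate_trailhead_ratings
-- ===== SOURCE A (Python) =====
-- def calculate_trailhead_ratings(topographic_map):
--     grid = [[int(char) for char in line] for line in topographic_map.strip().split("\n")]
--     rows, cols = len(grid), len(grid[0])
--
--     directions = [(-1, 0), (1, 0), (0, -1), (0, 1)]
--
--     memo = {}
--
--     def dfs(x, y):
--         if (x, y) in memo:
--             return memo[(x, y)]
--
--         current_height = grid[x][y]
--         if current_height == 9:
--             return 1
--
--         total_paths = 0
--         for dx, dy in directions: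
--             nx, ny = x + dx, y + dy
--             if 0 <= nx < rows and 0 <= ny < cols:
--                 if grid[nx][ny] == current_height + 1:
--                     total_paths += dfs(nx, ny)
--
--         memo[(x, y)] = total_paths
--         return total_paths
--
--     total_rating = 0
--
--     for r in range(rows):
--         for c in range(cols):
--             if grid[r][c] == 0:
--                 total_rating += dfs(r, c)
--
--     return total_rating
-- ===== SOURCE B (Python) =====
-- def calculate_trailhead_ratings(topographic_map):
--     grid = [[int(char) for char in line] for line in topographic_map.strip().split("\n")]
--     rows, cols = len(grid), len(grid[0])
--     cells = [(r, c) for r in range(rows) for c in range(cols)]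
--     paths = {}
--     for h in range(9, -1, -1):
--         for (r, c) in cells:
--             if grid[r][c] == h:
--                 if h == 9:
--                     paths[(r, c)] = 1
--                 else:
--                     paths[(r, c)] = sum(
--                         paths.get((nr, nc), 0)
--                         for nr, nc in ((r - 1, c), (r + 1, c), (r, c - 1), (r, c + 1))
--                         if 0 <= nr < rows and 0 <= nc < cols and grid[nr][nc] == h + 1)
--     return sum(paths.get((r, c), 0) for (r, c) in cells if grid[r][c] == 0)
-- ===== Notes on version B (the rewrite author's own statement) =====
-- stated objective: alternative
-- what changed: Replaces the recursive memoized DFS over trails with an iterative layered dynamic program: cells are processed by height from 9 down to 0 and each cell's path count is the sum of the already-computed counts of its height+1 neighbours, so there is no recursion and no memo dict.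
import Mathlib
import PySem

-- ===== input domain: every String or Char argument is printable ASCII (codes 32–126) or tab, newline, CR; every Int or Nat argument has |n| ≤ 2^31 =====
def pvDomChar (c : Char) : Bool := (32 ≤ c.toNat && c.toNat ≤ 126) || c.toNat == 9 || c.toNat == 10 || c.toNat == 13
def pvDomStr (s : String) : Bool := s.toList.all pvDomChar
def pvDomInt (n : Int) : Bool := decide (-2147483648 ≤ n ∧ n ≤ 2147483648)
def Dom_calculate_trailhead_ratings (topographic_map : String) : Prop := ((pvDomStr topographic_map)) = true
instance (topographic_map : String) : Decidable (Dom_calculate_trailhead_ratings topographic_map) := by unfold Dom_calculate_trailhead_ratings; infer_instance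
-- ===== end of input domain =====

-- B replaces A's recursive memoized DFS by an iterative layered DP over heights 9..0 (alternative decomposition, same cost).

-- ===== PORT A =====
-- shared parsing: grid = [[int(char) for char in line] for line in topographic_map.strip().split("\n")]
-- int(char) = char code - 48, exact because Pre_ admits only digit characters
def pvParse (topographic_map : String) : List (List Int) :=
  (((PySem.Str.split? (PySem.Str.strip topographic_map) "\n").getD [])).map
    (fun l => l.toList.map (fun c => ((c.toNat : Int) - 48)))

-- grid[x][y]; pyGetD is exact here because every access the admitted inputs reach is in range
def pvAt (grid : List (List Int)) (x y : Int) : Int :=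
  PySem.List.pyGetD (PySem.List.pyGetD grid x []) y 0

def pvDirs : List (Int × Int) := [(-1, 0), (1, 0), (0, -1), (0, 1)]

mutual
-- dfs(x, y) with the memo dict threaded through; the fuel argument only makes the
-- recursion structural: depth is ≤ 10 on digit grids (height rises by 1 each call), so fuel 10 is never exhausted under Pre_
def pvDfsA (grid : List (List Int)) (rows cols : Int) :
    Nat → Int → Int → PySem.Dict (Int × Int) Int → Int × PySem.Dict (Int × Int) Int
  | 0, _, _, memo => (0, memo)
  | Nat.succ k, x, y, memo =>
    match memo.get? (x, y) with
    | some v => (v, memo)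
    | none =>
      let h := pvAt grid x y
      if h = 9 then (1, memo)
      else
        let r := pvDfsLoopA grid rows cols k x y h pvDirs (0, memo)
        (r.1, r.2.insert (x, y) r.1)
  termination_by k _ _ _ => (k, 0)

-- the 'for dx, dy in directions' loop inside dfs, accumulating (total_paths, memo)
def pvDfsLoopA (grid : List (List Int)) (rows cols : Int) :
    Nat → Int → Int → Int → List (Int × Int) → Int × PySem.Dict (Int × Int) Int → Int × PySem.Dict (Int × Int) Int
  | _, _, _, _, [], st => st
  | k, x, y, h, d :: ds, st =>
    let nx := x + d.1
    let ny := y + d.2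
    if 0 ≤ nx ∧ nx < rows ∧ 0 ≤ ny ∧ ny < cols ∧ pvAt grid nx ny = h + 1 then
      let r := pvDfsA grid rows cols k nx ny st.2
      pvDfsLoopA grid rows cols k x y h ds (st.1 + r.1, r.2)
    else
      pvDfsLoopA grid rows cols k x y h ds st
  termination_by k _ _ _ ds _ => (k, ds.length + 1)
end

def calculate_trailhead_ratings (topographic_map : String) : Int :=
  let grid := pvParse topographic_map
  let rows : Int := grid.length
  let cols : Int := (grid.headD []).length   -- len(grid[0]); split always yields a nonempty list
  let st := (PySem.List.pyRange 0 rows 1).foldl (fun st r =>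
      (PySem.List.pyRange 0 cols 1).foldl (fun st c =>
        if pvAt grid r c = 0 then
          let v := pvDfsA grid rows cols 10 r c st.2
          (st.1 + v.1, v.2)
        else st) st)
    ((0 : Int), (PySem.Dict.empty : PySem.Dict (Int × Int) Int))
  st.1

-- ===== PORT B =====
def pvNbrs (r c : Int) : List (Int × Int) := [(r - 1, c), (r + 1, c), (r, c - 1), (r, c + 1)]

def calculate_trailhead_ratings_alt (topographic_map : String) : Int :=
  let grid := pvParse topographic_map
  let rows : Int := grid.length
  let cols : Int := (grid.headD []).length
  let cells := (PySem.List.pyRange 0 rows 1).flatMap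
    (fun r => (PySem.List.pyRange 0 cols 1).map (fun c => (r, c)))
  let paths := (PySem.List.pyRange 9 (-1) (-1)).foldl (fun paths h =>
      cells.foldl (fun (paths : PySem.Dict (Int × Int) Int) rc =>
        if pvAt grid rc.1 rc.2 = h then
          if h = 9 then paths.insert rc 1
          else paths.insert rc ((pvNbrs rc.1 rc.2).foldl (fun acc n =>
            if 0 ≤ n.1 ∧ n.1 < rows ∧ 0 ≤ n.2 ∧ n.2 < cols ∧ pvAt grid n.1 n.2 = h + 1
            then acc + paths.getD n 0 else acc) 0)
        else paths) paths)
    (PySem.Dict.empty : PySem.Dict (Int × Int) Int)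
  cells.foldl (fun acc rc => if pvAt grid rc.1 rc.2 = 0 then acc + paths.getD rc 0 else acc) 0

-- ===== PRECONDITION & SPEC =====
-- Pre_ excludes exactly the inputs on which A raises: a non-digit character anywhere
-- (ValueError in int(char)) or a line shorter than the first line (IndexError when indexing by cols).
def Pre_calculate_trailhead_ratings (topographic_map : String) : Prop :=
  (((PySem.Str.split? (PySem.Str.strip topographic_map) "\n").getD []).all
    (fun l => l.toList.all Char.isDigit) = true) ∧
  (((PySem.Str.split? (PySem.Str.strip topographic_map) "\n").getD []).all
    (fun l => decide ((((PySem.Str.split? (PySem.Str.strip topographic_map) "\n").getD []).headD "").toList.length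
      ≤ l.toList.length)) = true)
instance (topographic_map : String) : Decidable (Pre_calculate_trailhead_ratings topographic_map) := by
  unfold Pre_calculate_trailhead_ratings; infer_instance

def pvWitness_calculate_trailhead_ratings : String := "9"

def Spec_calculate_trailhead_ratings (topographic_map : String) (out : Int) : Prop := out = calculate_trailhead_ratings_alt topographic_map
instance (topographic_map : String) (out : Int) : Decidable (Spec_calculate_trailhead_ratings topographic_map out) := by unfold Spec_calculate_trailhead_ratings; infer_instance

-- ===== CLAIM (what is proved, stated in full; the proofs are below) =====
def Claim_equal_calculate_trailhead_ratings : Prop := ∀ (topographic_map : String), Dom_calculate_trailhead_ratings topographic_map → Pre_calculate_trailhead_ratings topographic_map → Spec_calculate_trailhead_ratings topographic_map (calculate_trailhead_ratings topographic_map)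

-- ===== LEMMAS AND PROOFS =====

-- the reference count of distinct ascending trails from (x,y), by remaining fuel
def pvCnt (grid : List (List Int)) (rows cols : Int) : Nat → Int → Int → Int
  | 0, _, _ => 0
  | Nat.succ k, x, y =>
    if pvAt grid x y = 9 then 1
    else (((pvNbrs x y).filter (fun n =>
        decide (0 ≤ n.1 ∧ n.1 < rows ∧ 0 ≤ n.2 ∧ n.2 < cols ∧ pvAt grid n.1 n.2 = pvAt grid x y + 1))).map
        (fun n => pvCnt grid rows cols k n.1 n.2)).sum

theorem pvCnt_succ (grid : List (List Int)) (rows cols : Int) (k : Nat) (x y : Int) :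
    pvCnt grid rows cols (k + 1) x y =
      if pvAt grid x y = 9 then 1
      else (((pvNbrs x y).filter (fun n =>
          decide (0 ≤ n.1 ∧ n.1 < rows ∧ 0 ≤ n.2 ∧ n.2 < cols ∧ pvAt grid n.1 n.2 = pvAt grid x y + 1))).map
          (fun n => pvCnt grid rows cols k n.1 n.2)).sum := rfl

-- all in-bounds heights are digits 0..9
def pvGood (grid : List (List Int)) (rows cols : Int) : Prop :=
  ∀ x y : Int, 0 ≤ x → x < rows → 0 ≤ y → y < cols → 0 ≤ pvAt grid x y ∧ pvAt grid x y ≤ 9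

theorem pvGood_of_lines (lines : List String)
    (hd : ∀ l ∈ lines, ∀ c ∈ l.toList, c.isDigit)
    (hl : ∀ l ∈ lines, (lines.headD "").toList.length ≤ l.toList.length) :
    pvGood (lines.map (fun l => l.toList.map (fun c => ((c.toNat : Int) - 48))))
      ((lines.map (fun l => l.toList.map (fun c => ((c.toNat : Int) - 48)))).length : Int)
      (((lines.map (fun l => l.toList.map (fun c => ((c.toNat : Int) - 48)))).headD []).length : Int) := by
  intro x y hx0 hxr hy0 hyc
  cases lines with
  | nil => simp at hxr; omega
  | cons l0 ls =>
    set lines := l0 :: ls with hlines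
    set grid := lines.map (fun l => l.toList.map (fun c => ((c.toNat : Int) - 48))) with hgrid
    have hxlen : x.toNat < lines.length := by
      have : grid.length = lines.length := by rw [hgrid]; simp
      omega
    have hxg : x.toNat < grid.length := by rw [hgrid]; simpa using hxlen
    have hline : grid[x.toNat]'hxg = (lines[x.toNat]'hxlen).toList.map (fun c => ((c.toNat : Int) - 48)) := by
      simp [hgrid]
    have hmem : lines[x.toNat]'hxlen ∈ lines := List.getElem_mem _
    have hcols : (grid.headD []).length = l0.toList.length := by
      rw [hgrid, hlines]; simp
    have hylen0 : y.toNat < (lines[x.toNat]'hxlen).toList.length := by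
      have hlong : l0.toList.length ≤ (lines[x.toNat]'hxlen).toList.length := hl _ hmem
      omega
    have hylen : y.toNat < (grid[x.toNat]'hxg).length := by
      rw [hline]; simpa using hylen0
    have hat : pvAt grid x y = (((lines[x.toNat]'hxlen).toList[y.toNat]'hylen0).toNat : Int) - 48 := by
      unfold pvAt
      rw [PySem.List.pyGetD_eq_getElem _ _ hx0 (by exact_mod_cast hxr)]
      rw [PySem.List.pyGetD_eq_getElem _ _ hy0 (by omega)]
      simp [hgrid]
    have hdig := hd _ hmem _ (List.getElem_mem hylen0)
    simp [Char.isDigit] at hdig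
    rcases hdig with ⟨h1, h2⟩
    rw [UInt32.le_iff_toNat_le] at h1 h2
    have h48 : (48 : UInt32).toNat = 48 := rfl
    have h57 : (57 : UInt32).toNat = 57 := rfl
    rw [h48] at h1; rw [h57] at h2
    have hv : ((lines[x.toNat]'hxlen).toList[y.toNat]'hylen0).toNat
        = ((lines[x.toNat]'hxlen).toList[y.toNat]'hylen0).val.toNat := rfl
    rw [hat, hv]
    constructor <;> omega

theorem pvGood_of_pre (s : String) (hp : Pre_calculate_trailhead_ratings s) :
    pvGood (pvParse s) (((pvParse s).length : Int)) ((((pvParse s).headD []).length : Int)) := by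
  rcases hp with ⟨hd, hl⟩
  rw [List.all_eq_true] at hd hl
  refine pvGood_of_lines ((PySem.Str.split? (PySem.Str.strip s) "\n").getD []) ?_ ?_
  · intro l hlm c hcm
    have := hd l hlm
    rw [List.all_eq_true] at this
    exact this c hcm
  · intro l hlm
    exact of_decide_eq_true (hl l hlm)

theorem pvCnt_stable (grid : List (List Int)) (rows cols : Int) (hg : pvGood grid rows cols) :
    ∀ k k' : Nat, ∀ x y : Int, 0 ≤ x → x < rows → 0 ≤ y → y < cols →
      (9 - pvAt grid x y).toNat < k → (9 - pvAt grid x y).toNat < k' →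
      pvCnt grid rows cols k x y = pvCnt grid rows cols k' x y := by
  intro k
  induction k with
  | zero => intro k' x y _ _ _ _ hk _; omega
  | succ m ih =>
    intro k' x y hx0 hxr hy0 hyc hk hk'
    cases k' with
    | zero => omega
    | succ m' =>
      rcases hg x y hx0 hxr hy0 hyc with ⟨hlo, hhi⟩
      by_cases h9 : pvAt grid x y = 9
      · simp [pvCnt, h9]
      · simp only [pvCnt, if_neg h9]
        congr 1
        apply List.map_congr_left
        intro n hn
        rw [List.mem_filter] at hn
        rcases hn with ⟨_, hcond⟩
        rw [decide_eq_true_eq] at hcond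
        rcases hcond with ⟨hn1, hn2, hn3, hn4, hn5⟩
        exact ih m' n.1 n.2 hn1 hn2 hn3 hn4 (by omega) (by omega)

-- memo invariant of A's dfs
def pvInv (grid : List (List Int)) (rows cols : Int) (memo : PySem.Dict (Int × Int) Int) : Prop :=
  ∀ p v, memo.get? p = some v →
    0 ≤ p.1 ∧ p.1 < rows ∧ 0 ≤ p.2 ∧ p.2 < cols ∧ v = pvCnt grid rows cols 10 p.1 p.2

theorem pvDirs_map (x y : Int) :
    pvDirs.map (fun d => (x + d.1, y + d.2)) = pvNbrs x y := by
  simp [pvDirs, pvNbrs]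
  exact ⟨by omega, by omega⟩

theorem pvDfsA_eq (grid : List (List Int)) (rows cols : Int) (hg : pvGood grid rows cols) :
    ∀ k : Nat,
      (∀ x y : Int, ∀ memo, 0 ≤ x → x < rows → 0 ≤ y → y < cols →
        (9 - pvAt grid x y).toNat < k → pvInv grid rows cols memo →
        (pvDfsA grid rows cols k x y memo).1 = pvCnt grid rows cols k x y ∧
        pvInv grid rows cols (pvDfsA grid rows cols k x y memo).2) ∧
      (∀ x y h : Int, ∀ ds : List (Int × Int), ∀ st : Int × PySem.Dict (Int × Int) Int,
        0 ≤ h → h ≤ 8 → (9 - h).toNat ≤ k → pvInv grid rows cols st.2 →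
        (pvDfsLoopA grid rows cols k x y h ds st).1 = st.1 +
          (((ds.map (fun d => (x + d.1, y + d.2))).filter (fun n =>
            decide (0 ≤ n.1 ∧ n.1 < rows ∧ 0 ≤ n.2 ∧ n.2 < cols ∧ pvAt grid n.1 n.2 = h + 1))).map
            (fun n => pvCnt grid rows cols k n.1 n.2)).sum ∧
        pvInv grid rows cols (pvDfsLoopA grid rows cols k x y h ds st).2) := by
  intro k
  induction k with
  | zero =>
    constructor
    · intro x y memo _ _ _ _ hk _; omega
    · intro x y h ds st h0 h8 hk _; omega
  | succ m ih =>
    rcases ih with ⟨ihP, ihQ⟩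
    have P : ∀ x y : Int, ∀ memo, 0 ≤ x → x < rows → 0 ≤ y → y < cols →
        (9 - pvAt grid x y).toNat < m + 1 → pvInv grid rows cols memo →
        (pvDfsA grid rows cols (m + 1) x y memo).1 = pvCnt grid rows cols (m + 1) x y ∧
        pvInv grid rows cols (pvDfsA grid rows cols (m + 1) x y memo).2 := by
      intro x y memo hx0 hxr hy0 hyc hk hinv
      rcases hg x y hx0 hxr hy0 hyc with ⟨hlo, hhi⟩
      cases hmemo : memo.get? (x, y) with
      | some v =>
        rcases hinv _ _ hmemo with ⟨b1, b2, b3, b4, hv⟩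
        simp only [pvDfsA, hmemo]
        refine ⟨?_, hinv⟩
        rw [hv]
        exact pvCnt_stable grid rows cols hg 10 (m + 1) x y hx0 hxr hy0 hyc (by omega) hk
      | none =>
        by_cases h9 : pvAt grid x y = 9
        · simp only [pvDfsA, hmemo, h9, if_pos]
          exact ⟨by simp [pvCnt, h9], hinv⟩
        · have h8 : pvAt grid x y ≤ 8 := by omega
          have hQ := ihQ x y (pvAt grid x y) pvDirs (0, memo) hlo h8 (by omega) hinv
          simp only [pvDfsA, hmemo, if_neg h9]
          rcases hQ with ⟨hQ1, hQ2⟩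
          have hcnt : pvCnt grid rows cols (m + 1) x y =
              (((pvNbrs x y).filter (fun n =>
                decide (0 ≤ n.1 ∧ n.1 < rows ∧ 0 ≤ n.2 ∧ n.2 < cols ∧
                  pvAt grid n.1 n.2 = pvAt grid x y + 1))).map
                (fun n => pvCnt grid rows cols m n.1 n.2)).sum := by
            simp only [pvCnt, if_neg h9]
          have hval : (pvDfsLoopA grid rows cols m x y (pvAt grid x y) pvDirs (0, memo)).1
              = pvCnt grid rows cols (m + 1) x y := by
            rw [hQ1, hcnt, pvDirs_map]
            simp
          refine ⟨hval, ?_⟩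
          intro p v hp
          rw [PySem.Dict.get?_insert] at hp
          by_cases hpe : p = (x, y)
          · rw [if_pos hpe] at hp
            injection hp with hp
            subst hpe
            refine ⟨hx0, hxr, hy0, hyc, ?_⟩
            rw [← hp, hval]
            exact pvCnt_stable grid rows cols hg (m + 1) 10 x y hx0 hxr hy0 hyc hk (by omega)
          · rw [if_neg hpe] at hp
            exact hQ2 _ _ hp
    refine ⟨P, ?_⟩
    intro x y h ds
    induction ds with
    | nil =>
      intro st h0 h8 hk hinv
      simp only [pvDfsLoopA, List.map_nil, List.filter_nil, List.sum_nil, add_zero]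
      exact ⟨trivial, hinv⟩
    | cons d ds ihds =>
      intro st h0 h8 hk hinv
      by_cases hc : 0 ≤ x + d.1 ∧ x + d.1 < rows ∧ 0 ≤ y + d.2 ∧ y + d.2 < cols ∧
          pvAt grid (x + d.1) (y + d.2) = h + 1
      · rcases hc with ⟨hc1, hc2, hc3, hc4, hc5⟩
        have hfuel : (9 - pvAt grid (x + d.1) (y + d.2)).toNat < m + 1 := by rw [hc5]; omega
        have hrec := P (x + d.1) (y + d.2) st.2 hc1 hc2 hc3 hc4 hfuel hinv
        rcases hrec with ⟨hr1, hr2⟩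
        have hrest := ihds (st.1 + (pvDfsA grid rows cols (m + 1) (x + d.1) (y + d.2) st.2).1,
          (pvDfsA grid rows cols (m + 1) (x + d.1) (y + d.2) st.2).2) h0 h8 hk hr2
        rcases hrest with ⟨hs1, hs2⟩
        simp only [pvDfsLoopA, if_pos (⟨hc1, hc2, hc3, hc4, hc5⟩ :
          0 ≤ x + d.1 ∧ x + d.1 < rows ∧ 0 ≤ y + d.2 ∧ y + d.2 < cols ∧
            pvAt grid (x + d.1) (y + d.2) = h + 1)]
        constructor
        · rw [hs1, hr1]
          simp only [List.map_cons, List.filter_cons]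
          rw [if_pos (by exact decide_eq_true (⟨hc1, hc2, hc3, hc4, hc5⟩ :
            0 ≤ x + d.1 ∧ x + d.1 < rows ∧ 0 ≤ y + d.2 ∧ y + d.2 < cols ∧
              pvAt grid (x + d.1) (y + d.2) = h + 1))]
          simp only [List.map_cons, List.sum_cons]
          ring
        · exact hs2
      · have hrest := ihds st h0 h8 hk hinv
        rcases hrest with ⟨hs1, hs2⟩
        simp only [pvDfsLoopA, if_neg hc]
        constructor
        · rw [hs1]
          simp only [List.map_cons, List.filter_cons]
          rw [if_neg (by simpa using hc)]
        · exact hs2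

theorem pvAInner (grid : List (List Int)) (rows cols : Int) (hg : pvGood grid rows cols)
    (r : Int) (hr0 : 0 ≤ r) (hrr : r < rows) :
    ∀ (cs : List Int) (st : Int × PySem.Dict (Int × Int) Int),
      (∀ c ∈ cs, 0 ≤ c ∧ c < cols) → pvInv grid rows cols st.2 →
      (cs.foldl (fun st c =>
        if pvAt grid r c = 0 then
          let v := pvDfsA grid rows cols 10 r c st.2
          (st.1 + v.1, v.2)
        else st) st).1
        = st.1 + ((cs.filter (fun c => decide (pvAt grid r c = 0))).map
            (fun c => pvCnt grid rows cols 10 r c)).sum ∧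
      pvInv grid rows cols ((cs.foldl (fun st c =>
        if pvAt grid r c = 0 then
          let v := pvDfsA grid rows cols 10 r c st.2
          (st.1 + v.1, v.2)
        else st) st)).2 := by
  intro cs
  induction cs with
  | nil => intro st _ hinv; exact ⟨by simp, hinv⟩
  | cons c cs ihcs =>
    intro st hb hinv
    have hc := hb c List.mem_cons_self
    by_cases hz : pvAt grid r c = 0
    · have hrec := (pvDfsA_eq grid rows cols hg 10).1 r c st.2 hr0 hrr hc.1 hc.2
        (by rw [hz]; omega) hinv
      rcases hrec with ⟨hr1, hr2⟩
      have hrest := ihcs (st.1 + (pvDfsA grid rows cols 10 r c st.2).1,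
        (pvDfsA grid rows cols 10 r c st.2).2) (fun c hcm => hb c (List.mem_cons_of_mem _ hcm)) hr2
      rcases hrest with ⟨hs1, hs2⟩
      simp only [List.foldl_cons, if_pos hz] at *
      refine ⟨?_, hs2⟩
      rw [hs1, hr1]
      simp only [List.filter_cons, decide_eq_true hz, if_pos, List.map_cons, List.sum_cons]
      ring
    · have hrest := ihcs st (fun c hcm => hb c (List.mem_cons_of_mem _ hcm)) hinv
      rcases hrest with ⟨hs1, hs2⟩
      simp only [List.foldl_cons, if_neg hz] at *
      refine ⟨?_, hs2⟩
      rw [hs1]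
      simp only [List.filter_cons]
      rw [if_neg (by simpa using hz)]

theorem pvAOuter (grid : List (List Int)) (rows cols : Int) (hg : pvGood grid rows cols) :
    ∀ (rs : List Int) (st : Int × PySem.Dict (Int × Int) Int),
      (∀ r ∈ rs, 0 ≤ r ∧ r < rows) → pvInv grid rows cols st.2 →
      (rs.foldl (fun st r =>
        (PySem.List.pyRange 0 cols 1).foldl (fun st c =>
          if pvAt grid r c = 0 then
            let v := pvDfsA grid rows cols 10 r c st.2
            (st.1 + v.1, v.2)
          else st) st) st).1
        = st.1 + (((rs.flatMap (fun r => (PySem.List.pyRange 0 cols 1).map (fun c => (r, c)))).filter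
            (fun rc => decide (pvAt grid rc.1 rc.2 = 0))).map
            (fun rc => pvCnt grid rows cols 10 rc.1 rc.2)).sum := by
  intro rs
  induction rs with
  | nil => intro st _ _; simp
  | cons r rs ihrs =>
    intro st hb hinv
    have hr := hb r List.mem_cons_self
    have hin := pvAInner grid rows cols hg r hr.1 hr.2 (PySem.List.pyRange 0 cols 1) st
      (fun c hcm => by rw [PySem.List.mem_pyRange_one] at hcm; exact hcm) hinv
    rcases hin with ⟨hi1, hi2⟩
    have hrest := ihrs _ (fun r hrm => hb r (List.mem_cons_of_mem _ hrm)) hi2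
    simp only [List.foldl_cons]
    rw [hrest, hi1]
    simp only [List.flatMap_cons, List.filter_append, List.map_append, List.sum_append]
    rw [List.filter_map, List.map_map]
    have : ((PySem.List.pyRange 0 cols 1).filter
        ((fun rc => decide (pvAt grid rc.1 rc.2 = 0)) ∘ (fun c => (r, c)))).map
        ((fun rc => pvCnt grid rows cols 10 rc.1 rc.2) ∘ (fun c => (r, c)))
        = ((PySem.List.pyRange 0 cols 1).filter (fun c => decide (pvAt grid r c = 0))).map
          (fun c => pvCnt grid rows cols 10 r c) := rfl
    rw [this]
    ring

-- dict characterized-- dict characterized by a predicate on cells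
def pvRep (grid : List (List Int)) (rows cols : Int) (d : PySem.Dict (Int × Int) Int)
    (C : Int × Int → Prop) : Prop :=
  ∀ p : Int × Int, (C p → d.get? p = some (pvCnt grid rows cols 10 p.1 p.2)) ∧ (¬ C p → d.get? p = none)

theorem pvRep_congr (grid : List (List Int)) (rows cols : Int) (d : PySem.Dict (Int × Int) Int)
    (C C' : Int × Int → Prop) (h : ∀ p, C p ↔ C' p) (hr : pvRep grid rows cols d C) :
    pvRep grid rows cols d C' := by
  intro p
  exact ⟨fun hc => (hr p).1 ((h p).mpr hc), fun hc => (hr p).2 (fun hb => hc ((h p).mp hb))⟩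

theorem pvBInner (grid : List (List Int)) (rows cols : Int) (hg : pvGood grid rows cols)
    (L : Int) (hL0 : 0 ≤ L) (hL9 : L ≤ 9) :
    ∀ (cs : List (Int × Int)) (C : Int × Int → Prop) (d : PySem.Dict (Int × Int) Int),
      (∀ rc ∈ cs, 0 ≤ rc.1 ∧ rc.1 < rows ∧ 0 ≤ rc.2 ∧ rc.2 < cols) →
      (∀ p : Int × Int, 0 ≤ p.1 → p.1 < rows → 0 ≤ p.2 → p.2 < cols → pvAt grid p.1 p.2 = L + 1 → C p) →
      pvRep grid rows cols d C →
      pvRep grid rows cols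
        (cs.foldl (fun (paths : PySem.Dict (Int × Int) Int) rc =>
          if pvAt grid rc.1 rc.2 = L then
            if L = 9 then paths.insert rc 1
            else paths.insert rc ((pvNbrs rc.1 rc.2).foldl (fun acc n =>
              if 0 ≤ n.1 ∧ n.1 < rows ∧ 0 ≤ n.2 ∧ n.2 < cols ∧ pvAt grid n.1 n.2 = L + 1
              then acc + paths.getD n 0 else acc) 0)
          else paths) d)
        (fun p => C p ∨ (p ∈ cs ∧ pvAt grid p.1 p.2 = L)) := by
  intro cs
  induction cs with
  | nil =>
    intro C d _ _ hrep
    simp only [List.foldl_nil]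
    refine pvRep_congr grid rows cols d C _ (fun p => ?_) hrep
    simp
  | cons rc cs ihcs =>
    intro C d hb hC2 hrep
    have hbrc := hb rc List.mem_cons_self
    rcases hbrc with ⟨hb1, hb2, hb3, hb4⟩
    simp only [List.foldl_cons]
    by_cases hz : pvAt grid rc.1 rc.2 = L
    · rw [if_pos hz]
      -- the inserted value is the true trail count of rc
      have hval : (if L = 9 then d.insert rc 1
          else d.insert rc ((pvNbrs rc.1 rc.2).foldl (fun acc n =>
            if 0 ≤ n.1 ∧ n.1 < rows ∧ 0 ≤ n.2 ∧ n.2 < cols ∧ pvAt grid n.1 n.2 = L + 1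
            then acc + d.getD n 0 else acc) 0))
          = d.insert rc (pvCnt grid rows cols 10 rc.1 rc.2) := by
        by_cases hL : L = 9
        · rw [if_pos hL]
          have : pvCnt grid rows cols 10 rc.1 rc.2 = 1 := by
            rw [show (10 : Nat) = 9 + 1 from rfl, pvCnt_succ, if_pos (by rw [hz, hL])]
          rw [this]
        · rw [if_neg hL]
          congr 1
          rw [PySem.List.foldl_ite_eq_foldl_filter
            (fun n => 0 ≤ n.1 ∧ n.1 < rows ∧ 0 ≤ n.2 ∧ n.2 < cols ∧ pvAt grid n.1 n.2 = L + 1)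
            (fun acc n => acc + d.getD n 0)]
          rw [PySem.List.foldl_add]
          have h9 : pvAt grid rc.1 rc.2 ≠ 9 := by omega
          have hcnt : pvCnt grid rows cols 10 rc.1 rc.2 =
              (((pvNbrs rc.1 rc.2).filter (fun n =>
                decide (0 ≤ n.1 ∧ n.1 < rows ∧ 0 ≤ n.2 ∧ n.2 < cols ∧
                  pvAt grid n.1 n.2 = L + 1))).map
                (fun n => pvCnt grid rows cols 9 n.1 n.2)).sum := by
            rw [show (10 : Nat) = 9 + 1 from rfl, pvCnt_succ, if_neg h9, hz]
          rw [hcnt]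
          rw [zero_add]
          refine congrArg List.sum ?_
          apply List.map_congr_left
          intro n hn
          rw [List.mem_filter, decide_eq_true_eq] at hn
          rcases hn with ⟨_, hn1, hn2, hn3, hn4, hn5⟩
          have hCn : C n := hC2 n hn1 hn2 hn3 hn4 hn5
          have := (hrep n).1 hCn
          rw [PySem.Dict.getD_eq_get?_getD, this]
          simp only [Option.getD_some]
          exact (pvCnt_stable grid rows cols hg 9 10 n.1 n.2 hn1 hn2 hn3 hn4
            (by omega) (by omega)).symm
      rw [hval]
      have hrep' : pvRep grid rows cols (d.insert rc (pvCnt grid rows cols 10 rc.1 rc.2))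
          (fun p => C p ∨ p = rc) := by
        intro p
        constructor
        · intro hp
          rw [PySem.Dict.get?_insert]
          by_cases hpe : p = rc
          · rw [if_pos hpe, hpe]
          · rw [if_neg hpe]
            rcases hp with hp | hp
            · exact (hrep p).1 hp
            · exact absurd hp hpe
        · intro hp
          push Not at hp
          rw [PySem.Dict.get?_insert, if_neg hp.2]
          exact (hrep p).2 hp.1
      have hres := ihcs (fun p => C p ∨ p = rc) (d.insert rc (pvCnt grid rows cols 10 rc.1 rc.2))
        (fun c hcm => hb c (List.mem_cons_of_mem _ hcm))
        (fun p p1 p2 p3 p4 p5 => Or.inl (hC2 p p1 p2 p3 p4 p5)) hrep'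
      refine pvRep_congr grid rows cols _ _ _ (fun p => ?_) hres
      constructor
      · rintro ((hp | hp) | ⟨hp1, hp2⟩)
        · exact Or.inl hp
        · exact Or.inr ⟨hp ▸ List.mem_cons_self, hp ▸ hz⟩
        · exact Or.inr ⟨List.mem_cons_of_mem _ hp1, hp2⟩
      · rintro (hp | ⟨hp1, hp2⟩)
        · exact Or.inl (Or.inl hp)
        · rcases List.mem_cons.mp hp1 with hpe | hpm
          · exact Or.inl (Or.inr hpe)
          · exact Or.inr ⟨hpm, hp2⟩
    · rw [if_neg hz]
      have hres := ihcs C d (fun c hcm => hb c (List.mem_cons_of_mem _ hcm)) hC2 hrep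
      refine pvRep_congr grid rows cols _ _ _ (fun p => ?_) hres
      constructor
      · rintro (hp | ⟨hp1, hp2⟩)
        · exact Or.inl hp
        · exact Or.inr ⟨List.mem_cons_of_mem _ hp1, hp2⟩
      · rintro (hp | ⟨hp1, hp2⟩)
        · exact Or.inl hp
        · rcases List.mem_cons.mp hp1 with hpe | hpm
          · exact absurd (hpe ▸ hp2) hz
          · exact Or.inr ⟨hpm, hp2⟩

def pvCge (grid : List (List Int)) (rows cols M : Int) (p : Int × Int) : Prop :=
  0 ≤ p.1 ∧ p.1 < rows ∧ 0 ≤ p.2 ∧ p.2 < cols ∧ M ≤ pvAt grid p.1 p.2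

theorem pvCells_mem (rows cols : Int) (rc : Int × Int) :
    rc ∈ (PySem.List.pyRange 0 rows 1).flatMap
        (fun r => (PySem.List.pyRange 0 cols 1).map (fun c => (r, c)))
      ↔ (0 ≤ rc.1 ∧ rc.1 < rows ∧ 0 ≤ rc.2 ∧ rc.2 < cols) := by
  cases rc with
  | mk a b =>
    simp [List.mem_flatMap, List.mem_map, PySem.List.mem_pyRange_one, Prod.ext_iff]
    tauto

theorem pvBLevels (grid : List (List Int)) (rows cols : Int) (hg : pvGood grid rows cols) :
    ∀ k : Nat, k ≤ 10 → ∀ d : PySem.Dict (Int × Int) Int,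
      pvRep grid rows cols d (pvCge grid rows cols (k : Int)) →
      pvRep grid rows cols
        ((PySem.List.pyRange ((k : Int) - 1) (-1) (-1)).foldl (fun paths h =>
          ((PySem.List.pyRange 0 rows 1).flatMap
            (fun r => (PySem.List.pyRange 0 cols 1).map (fun c => (r, c)))).foldl
            (fun (paths : PySem.Dict (Int × Int) Int) rc =>
            if pvAt grid rc.1 rc.2 = h then
              if h = 9 then paths.insert rc 1
              else paths.insert rc ((pvNbrs rc.1 rc.2).foldl (fun acc n =>
                if 0 ≤ n.1 ∧ n.1 < rows ∧ 0 ≤ n.2 ∧ n.2 < cols ∧ pvAt grid n.1 n.2 = h + 1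
                then acc + paths.getD n 0 else acc) 0)
            else paths) paths) d)
        (pvCge grid rows cols 0) := by
  intro k
  induction k with
  | zero =>
    intro _ d hrep
    rw [show ((0 : Nat) : Int) - 1 = -1 by norm_num, PySem.List.pyRange_neg_one_eq_nil (by norm_num)]
    simpa using hrep
  | succ k ihk =>
    intro hk d hrep
    have hcast : ((↑(k + 1) : Int) - 1) = (k : Int) := by push_cast; ring
    rw [hcast, PySem.List.pyRange_neg_one_cons (by omega : (-1 : Int) < (k : Int))]
    simp only [List.foldl_cons]
    apply ihk (by omega)
    have hrep' : pvRep grid rows cols d (pvCge grid rows cols ((k : Int) + 1)) := by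
      refine pvRep_congr grid rows cols d _ _ (fun p => ?_) hrep
      unfold pvCge
      push_cast
      rfl
    have hstep := pvBInner grid rows cols hg (k : Int) (by omega) (by omega)
      ((PySem.List.pyRange 0 rows 1).flatMap
        (fun r => (PySem.List.pyRange 0 cols 1).map (fun c => (r, c))))
      (pvCge grid rows cols ((k : Int) + 1)) d
      (fun rc hrc => (pvCells_mem rows cols rc).mp hrc)
      (fun p p1 p2 p3 p4 p5 => ⟨p1, p2, p3, p4, le_of_eq p5.symm⟩)
      hrep'
    refine pvRep_congr grid rows cols _ _ _ (fun p => ?_) hstep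
    constructor
    · rintro (⟨h1, h2, h3, h4, h5⟩ | ⟨hp1, hp2⟩)
      · exact ⟨h1, h2, h3, h4, by omega⟩
      · rcases (pvCells_mem rows cols p).mp hp1 with ⟨h1, h2, h3, h4⟩
        exact ⟨h1, h2, h3, h4, le_of_eq hp2.symm⟩
    · rintro ⟨h1, h2, h3, h4, h5⟩
      by_cases hgt : (k : Int) + 1 ≤ pvAt grid p.1 p.2
      · exact Or.inl ⟨h1, h2, h3, h4, hgt⟩
      · exact Or.inr ⟨(pvCells_mem rows cols p).mpr ⟨h1, h2, h3, h4⟩, by omega⟩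

theorem pvB_val (grid : List (List Int)) (rows cols : Int)
    (d : PySem.Dict (Int × Int) Int) (hr : pvRep grid rows cols d (pvCge grid rows cols 0)) :
    (((PySem.List.pyRange 0 rows 1).flatMap
        (fun r => (PySem.List.pyRange 0 cols 1).map (fun c => (r, c)))).foldl
      (fun acc rc => if pvAt grid rc.1 rc.2 = 0 then acc + d.getD rc 0 else acc) 0)
      = ((((PySem.List.pyRange 0 rows 1).flatMap
          (fun r => (PySem.List.pyRange 0 cols 1).map (fun c => (r, c)))).filter
          (fun rc => decide (pvAt grid rc.1 rc.2 = 0))).map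
          (fun rc => pvCnt grid rows cols 10 rc.1 rc.2)).sum := by
  rw [PySem.List.foldl_ite_eq_foldl_filter (fun rc => pvAt grid rc.1 rc.2 = 0)
    (fun acc rc => acc + d.getD rc 0)]
  rw [PySem.List.foldl_add, zero_add]
  refine congrArg List.sum (List.map_congr_left ?_)
  intro rc hrc
  rw [List.mem_filter, decide_eq_true_eq] at hrc
  rcases hrc with ⟨hm, hz⟩
  rcases (pvCells_mem rows cols rc).mp hm with ⟨h1, h2, h3, h4⟩
  have := (hr rc).1 ⟨h1, h2, h3, h4, le_of_eq hz.symm⟩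
  rw [PySem.Dict.getD_eq_get?_getD, this]
  rfl

-- ===== VERDICT (by name: the statement is the Claim_ definition above) =====
theorem calculate_trailhead_ratings_spec : Claim_equal_calculate_trailhead_ratings := by
  intro s _hdom hpre
  unfold Spec_calculate_trailhead_ratings
  have hg := pvGood_of_pre s hpre
  simp only [calculate_trailhead_ratings, calculate_trailhead_ratings_alt]
  have hinv0 : pvInv (pvParse s) ((pvParse s).length : Int) (((pvParse s).headD []).length : Int)
      (PySem.Dict.empty : PySem.Dict (Int × Int) Int) := by
    intro p v hp
    rw [PySem.Dict.get?_empty] at hp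
    cases hp
  have hA := pvAOuter (pvParse s) ((pvParse s).length : Int) (((pvParse s).headD []).length : Int)
    hg (PySem.List.pyRange 0 ((pvParse s).length : Int) 1)
    ((0 : Int), (PySem.Dict.empty : PySem.Dict (Int × Int) Int))
    (fun r hr => PySem.List.mem_pyRange_one.mp hr) hinv0
  rw [hA, zero_add]
  have hrep0 : pvRep (pvParse s) ((pvParse s).length : Int) (((pvParse s).headD []).length : Int)
      (PySem.Dict.empty : PySem.Dict (Int × Int) Int)
      (pvCge (pvParse s) ((pvParse s).length : Int) (((pvParse s).headD []).length : Int)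
        ((10 : Nat) : Int)) := by
    intro p
    constructor
    · rintro ⟨h1, h2, h3, h4, h5⟩
      exfalso
      have := (hg p.1 p.2 h1 h2 h3 h4).2
      omega
    · intro _
      exact PySem.Dict.get?_empty _
  have hlev := pvBLevels (pvParse s) ((pvParse s).length : Int)
    (((pvParse s).headD []).length : Int) hg 10 (le_refl 10)
    (PySem.Dict.empty : PySem.Dict (Int × Int) Int) hrep0
  rw [show ((10 : Nat) : Int) - 1 = 9 by norm_num] at hlev
  have hB := pvB_val (pvParse s) ((pvParse s).length : Int) (((pvParse s).headD []).length : Int)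
    _ hlev
  rw [hB]
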